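-- pv_equiv track=rewrite | github.com/pjj11005/Coding_Test | jeong-jae/Baekjoon/week9/1253.py | solution
-- ===== SOURCE A (Python) =====
-- def solution(n, array):
--     array.sort()
--     answer = 0
--     for i in range(n): # 모든 원소를 한번씩 목표로 지정
--         goal = array[i]
--         start = 0
--         end = len(array)-1
--         while start < end: # 포인터 두개로 범위 줄이며 탐색
--             if array[start] + array[end] == goal:
--                 if start == i:
--                     start += 1
--                 elif end == i:
--                     end -= 1
--                 else:
--                     answer += 1
--                     break
--             elif array[start] + array[end] > goal:
--                 end -= 1
--             elif array[start] + array[end] < goal: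
--                 start += 1
--     return answer
-- ===== SOURCE B (Python) =====
-- def solution(n, array):
--     # Note: like the original, this sorts `array` in place (observable side effect).
--     array.sort()
--     cnt = {}
--     for v in array:
--         cnt[v] = cnt.get(v, 0) + 1
--     answer = 0
--     for i in range(n):
--         x = array[i]
--         rem = dict(cnt)
--         rem[x] = rem[x] - 1  # exclude the target occurrence itself
--         if any(rem[a] > 0 and rem.get(x - a, 0) >= (2 if a == x - a else 1) for a in rem):
--             answer += 1
--     return answer
-- ===== Notes on version B (the rewrite author's own statement) =====
-- stated objective: alternative
-- what changed: The inner sorted two-pointer search is replaced by a hash-multiset (Counter) check: for each target occurrence its count is decremented and we ask whether some value a with remaining count and complement x-a (count >= 2 when a == x-a) exists among the distinct keys.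
import Mathlib
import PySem

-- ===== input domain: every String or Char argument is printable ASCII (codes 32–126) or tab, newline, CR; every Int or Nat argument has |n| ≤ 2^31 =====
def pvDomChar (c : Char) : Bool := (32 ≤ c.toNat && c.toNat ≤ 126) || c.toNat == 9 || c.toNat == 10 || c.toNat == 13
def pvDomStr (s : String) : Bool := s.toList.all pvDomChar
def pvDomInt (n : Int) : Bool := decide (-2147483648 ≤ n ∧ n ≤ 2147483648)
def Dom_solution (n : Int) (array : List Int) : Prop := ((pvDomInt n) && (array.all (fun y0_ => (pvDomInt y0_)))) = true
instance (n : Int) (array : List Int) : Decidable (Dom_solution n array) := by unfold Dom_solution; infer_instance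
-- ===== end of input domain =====

-- B replaces A's sorted two-pointer inner search by a Counter (hash-multiset) existence check
-- over the distinct values; both A and B sort `array` in place (the equivalence is about the return value).

-- ===== PORT A =====
-- the `while start < end` two-pointer loop of A; indices start/endv are always in range
-- (0 ≤ start < endv ≤ len-1) whenever an element is read, so pyGetD's default is never used
-- fuel is a totality guard only: each iteration shrinks endv - start by at least 1, so any
-- fuel ≥ (endv - start).toNat (callers pass len(array)) makes this exactly Python's while loop
def pvLoopA (s : List Int) (goal i : Int) : Nat → Int → Int → Int
  | 0, _, _ => 0
  | fuel + 1, start, endv =>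
    if start < endv then
      if PySem.List.pyGetD s start 0 + PySem.List.pyGetD s endv 0 = goal then
        if start = i then pvLoopA s goal i fuel (start + 1) endv
        else if endv = i then pvLoopA s goal i fuel start (endv - 1)
        else 1                                          -- answer += 1; break
      else if PySem.List.pyGetD s start 0 + PySem.List.pyGetD s endv 0 > goal then
        pvLoopA s goal i fuel start (endv - 1)
      else
        pvLoopA s goal i fuel (start + 1) endv
    else 0

def solution (n : Int) (array : List Int) : Int :=
  let s := PySem.List.sorted array (fun x => x) false       -- array.sort()
  (PySem.List.pyRange 0 n).foldl
    (fun answer i =>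
      -- goal = array[i] (Pre_ guarantees i in range), then the two-pointer scan
      answer + pvLoopA s (PySem.List.pyGetD s i 0) i s.length 0 ((s.length : Int) - 1)) 0

-- ===== PORT B =====
-- any(rem[a] > 0 and rem.get(x - a, 0) >= (2 if a == x - a else 1) for a in rem)
def pvFoundB (rem : PySem.Dict Int Int) (x : Int) : Bool :=
  rem.keys.any (fun a =>
    decide (0 < rem.getD a 0 ∧ (if a = x - a then 2 else 1) ≤ rem.getD (x - a) 0))

def solution_alt (n : Int) (array : List Int) : Int :=
  let s := PySem.List.sorted array (fun x => x) false       -- array.sort()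
  let cnt := s.foldl (fun d v => d.insert v (d.getD v 0 + 1)) PySem.Dict.empty
  (PySem.List.pyRange 0 n).foldl
    (fun answer i =>
      let x := PySem.List.pyGetD s i 0                      -- x = array[i]
      let rem := cnt.insert x (cnt.getD x 0 - 1)            -- rem = dict(cnt); rem[x] -= 1
      if pvFoundB rem x then answer + 1 else answer) 0

-- ===== PRECONDITION & SPEC =====
-- A (and B) raise IndexError on array[i] when n exceeds len(array); nothing else is excluded.
def Pre_solution (n : Int) (array : List Int) : Prop := n ≤ (array.length : Int)
instance (n : Int) (array : List Int) : Decidable (Pre_solution n array) := by unfold Pre_solution; infer_instance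
def pvWitness_solution : Int × List Int := (5, [1, 2, 3, 1, 2])

def Spec_solution (n : Int) (array : List Int) (out : Int) : Prop := out = solution_alt n array
instance (n : Int) (array : List Int) (out : Int) : Decidable (Spec_solution n array out) := by unfold Spec_solution; infer_instance

-- ===== CLAIM (what is proved, stated in full; the proofs are below) =====
def Claim_equal_solution : Prop := ∀ (n : Int) (array : List Int), Dom_solution n array → Pre_solution n array → Spec_solution n array (solution n array)

-- ===== LEMMAS AND PROOFS =====

-- The common characterisation both searches are proved equal to: positions j < k, both
-- different from i, whose values sum to g (all indexing via getD, total).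
def pvPair (s : List Int) (i : Int) (g : Int) (start endv : Int) : Prop :=
  ∃ j k : Nat, start ≤ (j : Int) ∧ j < k ∧ (k : Int) ≤ endv ∧
    (j : Int) ≠ i ∧ (k : Int) ≠ i ∧ s.getD j 0 + s.getD k 0 = g

theorem pvLoopA_zero_or_one (s : List Int) (g i : Int) :
    ∀ (fuel : Nat) (start endv : Int),
      pvLoopA s g i fuel start endv = 0 ∨ pvLoopA s g i fuel start endv = 1 := by
  intro fuel
  induction fuel with
  | zero =>
    intro start endv
    exact Or.inl rfl
  | succ m ih =>
    intro start endv
    by_cases h1 : start < endv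
    · rw [pvLoopA, if_pos h1]
      split_ifs with h2 h3 h4 h5
      · exact ih (start + 1) endv
      · exact ih start (endv - 1)
      · exact Or.inr rfl
      · exact ih start (endv - 1)
      · exact ih (start + 1) endv
    · rw [pvLoopA, if_neg h1]
      exact Or.inl rfl

theorem pvLoopA_eq_one_iff (s : List Int) (g i : Int)
    (hm : ∀ p q : Nat, p ≤ q → q < s.length → s.getD p 0 ≤ s.getD q 0) :
    ∀ (fuel : Nat) (start endv : Int), (endv - start).toNat ≤ fuel →
      0 ≤ start → endv < (s.length : Int) →
      (pvLoopA s g i fuel start endv = 1 ↔ pvPair s i g start endv) := by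
  intro fuel
  induction fuel with
  | zero =>
    intro start endv hf hs0 he
    show (0 = 1 ↔ _)
    constructor
    · intro h; omega
    · rintro ⟨j, k, c1, c2, c3, _, _, _⟩; exfalso; omega
  | succ m ih =>
    intro start endv hf hs0 he
    by_cases h1 : start < endv
    · rw [pvLoopA, if_pos h1,
        PySem.List.pyGetD_of_nonneg s 0 hs0,
        PySem.List.pyGetD_of_nonneg s 0 (show (0:Int) ≤ endv by omega)]
      split_ifs with h2 h3 h4 h5
      · -- sum = g, start = i : skip start
        rw [ih (start + 1) endv (by omega) (by omega) he]
        constructor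
        · rintro ⟨j, k, c1, c2, c3, c4, c5, c6⟩
          exact ⟨j, k, by omega, c2, c3, c4, c5, c6⟩
        · rintro ⟨j, k, c1, c2, c3, c4, c5, c6⟩
          have c4' : (j : Int) ≠ start := by rw [h3]; exact c4
          exact ⟨j, k, by omega, c2, c3, c4, c5, c6⟩
      · -- sum = g, endv = i : skip endv
        rw [ih start (endv - 1) (by omega) hs0 (by omega)]
        constructor
        · rintro ⟨j, k, c1, c2, c3, c4, c5, c6⟩
          exact ⟨j, k, c1, c2, by omega, c4, c5, c6⟩
        · rintro ⟨j, k, c1, c2, c3, c4, c5, c6⟩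
          have c5' : (k : Int) ≠ endv := by rw [h4]; exact c5
          exact ⟨j, k, c1, c2, by omega, c4, c5, c6⟩
      · -- sum = g, both usable : found
        refine iff_of_true rfl ⟨start.toNat, endv.toNat, by omega, by omega, by omega,
          by omega, by omega, ?_⟩
        have e1 : (start.toNat : Int) = start := by omega
        have e2 : (endv.toNat : Int) = endv := by omega
        exact h2
      · -- sum > g : drop endv
        rw [ih start (endv - 1) (by omega) hs0 (by omega)]
        constructor
        · rintro ⟨j, k, c1, c2, c3, c4, c5, c6⟩
          exact ⟨j, k, c1, c2, by omega, c4, c5, c6⟩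
        · rintro ⟨j, k, c1, c2, c3, c4, c5, c6⟩
          by_cases hke : (k : Int) ≤ endv - 1
          · exact ⟨j, k, c1, c2, hke, c4, c5, c6⟩
          · exfalso
            have hkeq : k = endv.toNat := by omega
            have hmono := hm start.toNat j (by omega) (by omega)
            rw [hkeq] at c6
            omega
      · -- sum < g : advance start
        rw [ih (start + 1) endv (by omega) (by omega) he]
        constructor
        · rintro ⟨j, k, c1, c2, c3, c4, c5, c6⟩
          exact ⟨j, k, by omega, c2, c3, c4, c5, c6⟩
        · rintro ⟨j, k, c1, c2, c3, c4, c5, c6⟩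
          by_cases hjs : start + 1 ≤ (j : Int)
          · exact ⟨j, k, hjs, c2, c3, c4, c5, c6⟩
          · exfalso
            have hjeq : j = start.toNat := by omega
            have hmono := hm k endv.toNat (by omega) (by omega)
            rw [hjeq] at c6
            omega
    · rw [pvLoopA, if_neg h1]
      constructor
      · intro h; omega
      · rintro ⟨j, k, c1, c2, c3, _, _, _⟩; exfalso; omega


-- counting in a list with one position removed
theorem pv_count_eraseIdx (s : List Int) (i : Nat) (hi : i < s.length) (v : Int) :
    s.count v = (s.eraseIdx i).count v + (if s.getD i 0 = v then 1 else 0) := by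
  conv_lhs => rw [← List.take_append_drop i s, List.drop_eq_getElem_cons hi]
  rw [List.eraseIdx_eq_take_drop_succ, List.count_append, List.count_append,
    List.count_cons, List.getD_eq_getElem _ _ hi]
  by_cases h : s[i] = v
  · rw [if_pos h, if_pos (by simp [h])]
    omega
  · rw [if_neg h, if_neg (by simp; exact h)]
    omega

theorem pvFoundB_iff (s : List Int) (i : Int) (h0 : 0 ≤ i) (hi : i < (s.length : Int)) :
    (pvFoundB ((PySem.Dict.counter s).insert (PySem.List.pyGetD s i 0)
        ((PySem.Dict.counter s).getD (PySem.List.pyGetD s i 0) 0 - 1)) (PySem.List.pyGetD s i 0) = true)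
      ↔ pvPair s i (PySem.List.pyGetD s i 0) 0 ((s.length : Int) - 1) := by
  set x := PySem.List.pyGetD s i 0 with hxdef
  have hiN : i.toNat < s.length := by omega
  have hx : x = s.getD i.toNat 0 := PySem.List.pyGetD_of_nonneg s 0 h0
  set t := s.eraseIdx i.toNat with htdef
  have htlen : t.length = s.length - 1 := by
    rw [htdef, List.length_eraseIdx, if_pos hiN]
  -- counts of the multiset with position i removed
  have hrem : ∀ v : Int,
      ((PySem.Dict.counter s).insert x ((PySem.Dict.counter s).getD x 0 - 1)).getD v 0
        = (t.count v : Int) := by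
    intro v
    rw [PySem.Dict.getD_insert]
    by_cases hv : v = x
    · rw [if_pos hv, hv, PySem.Dict.getD_counter]
      have hc2 := pv_count_eraseIdx s i.toNat hiN x
      rw [if_pos hx.symm, ← htdef] at hc2
      omega
    · rw [if_neg hv, PySem.Dict.getD_counter]
      have hc := pv_count_eraseIdx s i.toNat hiN v
      rw [if_neg (by rw [← hx]; exact fun hh => hv hh.symm), ← htdef] at hc
      omega
  have hxs : x ∈ s := by
    rw [hx, List.getD_eq_getElem _ _ hiN]; exact List.getElem_mem hiN
  have hkeys : ∀ a : Int,
      a ∈ ((PySem.Dict.counter s).insert x ((PySem.Dict.counter s).getD x 0 - 1)).keys ↔ a ∈ s := by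
    intro a
    rw [PySem.Dict.mem_keys_insert, PySem.Dict.keys_counter, PySem.Set.mem_ofList]
    constructor
    · rintro (rfl | ha); exacts [hxs, ha]
    · exact Or.inr
  -- t-index p ↦ s-index (the position it came from)
  have hfp : ∀ p : Nat, p < t.length →
      (if p < i.toNat then p else p + 1) < s.length ∧
      (if p < i.toNat then p else p + 1) ≠ i.toNat ∧
      s.getD (if p < i.toNat then p else p + 1) 0 = t.getD p 0 := by
    intro p hp
    have hp' : p < (s.eraseIdx i.toNat).length := by rw [← htdef]; exact hp
    by_cases hpi : p < i.toNat
    · rw [if_pos hpi]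
      refine ⟨by omega, by omega, ?_⟩
      rw [htdef, List.getD_eq_getElem _ _ (by omega), List.getD_eq_getElem _ _ hp',
        List.getElem_eraseIdx hp', dif_pos hpi]
    · rw [if_neg hpi]
      refine ⟨by omega, by omega, ?_⟩
      rw [htdef, List.getD_eq_getElem _ _ (by omega), List.getD_eq_getElem _ _ hp',
        List.getElem_eraseIdx hp', dif_neg hpi]
  have hmonof : ∀ p q : Nat, p < q →
      (if p < i.toNat then p else p + 1) < (if q < i.toNat then q else q + 1) := by
    intro p q h; split_ifs <;> omega
  -- s-index j ≠ i ↦ t-index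
  have hgp : ∀ j : Nat, j < s.length → j ≠ i.toNat →
      (if j < i.toNat then j else j - 1) < t.length ∧
      t.getD (if j < i.toNat then j else j - 1) 0 = s.getD j 0 := by
    intro j hj hji
    by_cases hpi : j < i.toNat
    · rw [if_pos hpi]
      have h1 : j < t.length := by omega
      have h1' : j < (s.eraseIdx i.toNat).length := by rw [← htdef]; exact h1
      refine ⟨h1, ?_⟩
      rw [htdef, List.getD_eq_getElem _ _ h1', List.getD_eq_getElem _ _ hj,
        List.getElem_eraseIdx h1', dif_pos hpi]
    · rw [if_neg hpi]
      have h1 : j - 1 < t.length := by omega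
      have h1' : j - 1 < (s.eraseIdx i.toNat).length := by rw [← htdef]; exact h1
      refine ⟨h1, ?_⟩
      rw [htdef, List.getD_eq_getElem _ _ h1', List.getD_eq_getElem _ _ hj,
        List.getElem_eraseIdx h1', dif_neg (by omega)]
      simp only [show j - 1 + 1 = j from by omega]
  have hmem1 : ∀ a : Int, 0 < t.count a ↔ ∃ p : Nat, p < t.length ∧ t.getD p 0 = a := by
    intro a
    rw [List.count_pos_iff, List.mem_iff_getElem]
    constructor
    · rintro ⟨p, hp, hval⟩; exact ⟨p, hp, by rw [List.getD_eq_getElem _ _ hp, hval]⟩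
    · rintro ⟨p, hp, hval⟩; exact ⟨p, hp, by rw [List.getD_eq_getElem _ _ hp] at hval; exact hval⟩
  have hdup : ∀ a : Int, 2 ≤ t.count a ↔
      ∃ p q : Nat, p < q ∧ q < t.length ∧ t.getD p 0 = a ∧ t.getD q 0 = a := by
    intro a
    rw [← List.duplicate_iff_two_le_count, List.duplicate_iff_exists_distinct_get]
    constructor
    · rintro ⟨nn, mm, hnm, h1, h2⟩
      refine ⟨nn, mm, Fin.lt_def.mp hnm, mm.isLt, ?_, ?_⟩
      · rw [List.getD_eq_getElem _ _ nn.isLt, ← List.get_eq_getElem]; exact h1.symm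
      · rw [List.getD_eq_getElem _ _ mm.isLt, ← List.get_eq_getElem]; exact h2.symm
    · rintro ⟨p, q, hpq, hq, hvp, hvq⟩
      refine ⟨⟨p, by omega⟩, ⟨q, hq⟩, Fin.mk_lt_mk.mpr hpq, ?_, ?_⟩
      · rw [List.get_eq_getElem]; rw [List.getD_eq_getElem _ _ (show p < t.length by omega)] at hvp
        exact hvp.symm
      · rw [List.get_eq_getElem]; rw [List.getD_eq_getElem _ _ hq] at hvq
        exact hvq.symm
  simp only [pvFoundB, List.any_eq_true, decide_eq_true_eq]
  constructor
  · rintro ⟨a, haK, hp1, hp2⟩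
    rw [hrem a] at hp1
    rw [hrem (x - a)] at hp2
    have hca : 0 < t.count a := by exact_mod_cast hp1
    by_cases hab : a = x - a
    · rw [if_pos hab] at hp2
      have h2c : 2 ≤ t.count a := by rw [hab]; exact_mod_cast hp2
      obtain ⟨p, q, hpq, hq, hvp, hvq⟩ := (hdup a).mp h2c
      obtain ⟨hL1, hN1, hV1⟩ := hfp p (by omega)
      obtain ⟨hL2, hN2, hV2⟩ := hfp q hq
      refine ⟨(if p < i.toNat then p else p + 1), (if q < i.toNat then q else q + 1),
        by omega, hmonof p q hpq, by omega,
        fun heq => hN1 (by omega), fun heq => hN2 (by omega), ?_⟩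
      rw [hV1, hV2, hvp, hvq]; omega
    · rw [if_neg hab] at hp2
      have hcb : 0 < t.count (x - a) := by exact_mod_cast hp2
      obtain ⟨p, hp, hvp⟩ := (hmem1 a).mp hca
      obtain ⟨q, hq, hvq⟩ := (hmem1 (x - a)).mp hcb
      have hpq : p ≠ q := by intro h; subst h; exact hab (hvp.symm.trans hvq)
      obtain ⟨hL1, hN1, hV1⟩ := hfp p hp
      obtain ⟨hL2, hN2, hV2⟩ := hfp q hq
      rcases lt_or_gt_of_ne hpq with hlt | hgt
      · refine ⟨(if p < i.toNat then p else p + 1), (if q < i.toNat then q else q + 1),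
          by omega, hmonof p q hlt, by omega,
          fun heq => hN1 (by omega), fun heq => hN2 (by omega), ?_⟩
        rw [hV1, hV2, hvp, hvq]; omega
      · refine ⟨(if q < i.toNat then q else q + 1), (if p < i.toNat then p else p + 1),
          by omega, hmonof q p hgt, by omega,
          fun heq => hN2 (by omega), fun heq => hN1 (by omega), ?_⟩
        rw [hV1, hV2, hvp, hvq]; omega
  · rintro ⟨j, k, c1, c2, c3, c4, c5, c6⟩
    have hjlen : j < s.length := by omega
    have hklen : k < s.length := by omega
    have hjne : j ≠ i.toNat := fun h => c4 (by omega)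
    have hkne : k ≠ i.toNat := fun h => c5 (by omega)
    obtain ⟨hgl1, hgv1⟩ := hgp j hjlen hjne
    obtain ⟨hgl2, hgv2⟩ := hgp k hklen hkne
    have hbval : s.getD k 0 = x - s.getD j 0 := by omega
    refine ⟨s.getD j 0, (hkeys _).mpr (by rw [List.getD_eq_getElem _ _ hjlen]; exact List.getElem_mem hjlen), ?_, ?_⟩
    · rw [hrem]
      have : 0 < t.count (s.getD j 0) := (hmem1 _).mpr ⟨_, hgl1, hgv1⟩
      exact_mod_cast this
    · rw [hrem]
      by_cases hab : s.getD j 0 = x - s.getD j 0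
      · rw [if_pos hab]
        have hord : (if j < i.toNat then j else j - 1) < (if k < i.toNat then k else k - 1) := by
          split_ifs <;> omega
        have h2c : 2 ≤ t.count (x - s.getD j 0) := by
          rw [← hab]
          exact (hdup _).mpr ⟨_, _, hord, hgl2, hgv1, by rw [hgv2, hbval, ← hab]⟩
        exact_mod_cast h2c
      · rw [if_neg hab]
        have : 0 < t.count (x - s.getD j 0) := (hmem1 _).mpr ⟨_, hgl2, by rw [hgv2, hbval]⟩
        exact_mod_cast this

-- ===== VERDICT (by name: the statement is the Claim_ definition above) =====
theorem solution_spec : Claim_equal_solution := by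
  intro n array _hdom hpre
  unfold Spec_solution
  simp only [solution, solution_alt]
  rw [PySem.Dict.foldl_insert_getD_add_one_eq_counter]
  apply PySem.List.foldl_congr_mem
  intro acc i himem
  have hib := PySem.List.mem_pyRange_one.mp himem
  have hlen : i < ((PySem.List.sorted array (fun x => x) false).length : Int) := by
    have hls := PySem.List.length_sorted (xs := array) (key := fun x => x) (rev := false)
    unfold Pre_solution at hpre
    omega
  have hmono : ∀ p q : Nat, p ≤ q → q < (PySem.List.sorted array (fun x => x) false).length →
      (PySem.List.sorted array (fun x => x) false).getD p 0 ≤ (PySem.List.sorted array (fun x => x) false).getD q 0 := by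
    intro p q hpq hq
    rw [List.getD_eq_getElem _ _ (Nat.lt_of_le_of_lt hpq hq), List.getD_eq_getElem _ _ hq]
    exact PySem.List.sorted_id_getElem_mono array hpq hq
  by_cases hfound : pvFoundB ((PySem.Dict.counter (PySem.List.sorted array (fun x => x) false)).insert
      (PySem.List.pyGetD (PySem.List.sorted array (fun x => x) false) i 0)
      ((PySem.Dict.counter (PySem.List.sorted array (fun x => x) false)).getD
        (PySem.List.pyGetD (PySem.List.sorted array (fun x => x) false) i 0) 0 - 1))
      (PySem.List.pyGetD (PySem.List.sorted array (fun x => x) false) i 0) = true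
  · rw [if_pos hfound]
    have hp := (pvFoundB_iff _ i hib.1 hlen).mp hfound
    have := (pvLoopA_eq_one_iff _ _ i hmono (PySem.List.sorted array (fun x => x) false).length
      0 _ (by omega) le_rfl (by omega)).mpr hp
    omega
  · rw [if_neg hfound]
    have hp : ¬ pvPair (PySem.List.sorted array (fun x => x) false) i
        (PySem.List.pyGetD (PySem.List.sorted array (fun x => x) false) i 0) 0
        ((PySem.List.sorted array (fun x => x) false).length - 1) := fun hq =>
      hfound ((pvFoundB_iff _ i hib.1 hlen).mpr hq)
    have h01 := pvLoopA_zero_or_one (PySem.List.sorted array (fun x => x) false)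
      (PySem.List.pyGetD (PySem.List.sorted array (fun x => x) false) i 0) i
      (PySem.List.sorted array (fun x => x) false).length 0
      ((PySem.List.sorted array (fun x => x) false).length - 1)
    have hne1 : pvLoopA (PySem.List.sorted array (fun x => x) false)
        (PySem.List.pyGetD (PySem.List.sorted array (fun x => x) false) i 0) i
        (PySem.List.sorted array (fun x => x) false).length 0
        ((PySem.List.sorted array (fun x => x) false).length - 1) ≠ 1 := fun h =>
      hp ((pvLoopA_eq_one_iff _ _ i hmono (PySem.List.sorted array (fun x => x) false).length
        0 _ (by omega) le_rfl (by omega)).mp h)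
    rcases h01 with h0 | h0 <;> omega
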